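-- pv_equiv track=rewrite | github.com/AlexPaks/idea-to-prod | backend/app/services/prompts/loader.py | _find_tokens
-- ===== SOURCE A (Python) =====
-- def _find_tokens(template: str) -> set[str]:
--     tokens: set[str] = set()
--     start_index = 0
--     while True:
--         start = template.find("{{", start_index)
--         if start < 0:
--             break
--         end = template.find("}}", start + 2)
--         if end < 0:
--             break
--         tokens.add(template[start : end + 2])
--         start_index = end + 2
--     return tokens
-- ===== SOURCE B (Python) =====
-- def _find_tokens(template: str) -> set[str]:
--     tokens: set[str] = set()
--     buf = None  # None = outside a token; else the token text collected so far
--     i = 0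
--     n = len(template)
--     while i < n:
--         if buf is None:
--             if template.startswith("{{", i):
--                 buf = "{{"
--                 i += 2
--             else:
--                 i += 1
--         else:
--             if template.startswith("}}", i):
--                 tokens.add(buf + "}}")
--                 buf = None
--                 i += 2
--             else:
--                 buf += template[i]
--                 i += 1
--     return tokens
-- ===== Notes on version B (the rewrite author's own statement) =====
-- stated objective: idiomatic
-- what changed: Replaces the find/find index-jumping while-loop with a single left-to-right character scan (a two-state machine: outside a token / collecting a token buffer) that never calls str.find.
import Mathlib
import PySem

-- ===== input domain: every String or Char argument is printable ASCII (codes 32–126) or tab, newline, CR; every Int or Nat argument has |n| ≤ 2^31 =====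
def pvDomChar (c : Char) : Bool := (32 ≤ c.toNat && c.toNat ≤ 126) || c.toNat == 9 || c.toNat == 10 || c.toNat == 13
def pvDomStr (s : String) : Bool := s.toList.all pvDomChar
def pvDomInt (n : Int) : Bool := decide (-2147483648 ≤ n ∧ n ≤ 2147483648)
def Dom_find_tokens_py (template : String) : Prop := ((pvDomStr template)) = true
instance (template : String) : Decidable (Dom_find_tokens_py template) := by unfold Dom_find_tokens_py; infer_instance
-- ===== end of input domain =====

-- B replaces A's find/find index-jumping loop with a single character scan (a two-state
-- machine: outside a token / collecting the current token); objective: idiomatic, same cost.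

-- ===== PORT A =====
-- A's `while True` loop; fuel (length+1) only makes the recursion total — the loop always
-- breaks before the fuel runs out because start_index strictly increases each iteration.
def findTokensALoop (fuel : Nat) (s : List Char) (tokens : PySem.Set String) (start_index : Int) : List String :=
  match fuel with
  | 0 => tokens
  | fuel + 1 =>
    let start := PySem.Chars.findFrom s ['{', '{'] start_index
    if start < 0 then tokens
    else
      let e := PySem.Chars.findFrom s ['}', '}'] (start + 2)
      if e < 0 then tokens
      else
        findTokensALoop fuel s
          (PySem.Set.add tokens (String.ofList (PySem.List.slice s (some start) (some (e + 2)))))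
          (e + 2)

def find_tokens_py (template : String) : List String :=
  findTokensALoop (template.toList.length + 1) template.toList PySem.Set.empty 0

-- ===== PORT B =====
-- B's single scan: `buf = none` ↔ outside a token, `buf = some b` ↔ inside one;
-- consuming the char list structurally is B's `i += 1` / `i += 2` index walk.
def findTokensBLoop (tokens : PySem.Set String) (buf : Option (List Char)) (cs : List Char) : List String :=
  match cs with
  | [] => tokens
  | [_] => tokens
  | c1 :: c2 :: rest =>
    match buf with
    | none =>
      if c1 = '{' ∧ c2 = '{' then findTokensBLoop tokens (some ['{', '{']) rest
      else findTokensBLoop tokens none (c2 :: rest)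
    | some b =>
      if c1 = '}' ∧ c2 = '}' then
        findTokensBLoop (PySem.Set.add tokens (String.ofList (b ++ ['}', '}']))) none rest
      else findTokensBLoop tokens (some (b ++ [c1])) (c2 :: rest)
  termination_by cs.length

def find_tokens_py_alt (template : String) : List String :=
  findTokensBLoop PySem.Set.empty none template.toList

-- ===== PRECONDITION & SPEC =====
def Spec_find_tokens_py (template : String) (out : List String) : Prop := out = find_tokens_py_alt template
instance (template : String) (out : List String) : Decidable (Spec_find_tokens_py template out) := by unfold Spec_find_tokens_py; infer_instance

-- ===== CLAIM (what is proved, stated in full; the proofs are below) =====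
def Claim_equal_find_tokens_py : Prop := ∀ (template : String), Dom_find_tokens_py template → Spec_find_tokens_py template (find_tokens_py template)

-- ===== LEMMAS AND PROOFS =====

-- no "{{" anywhere: the scan finishes without ever entering a token
theorem bloop_none_no_open (cs : List Char) (tokens : PySem.Set String)
    (h : ¬ (['{', '{'] <:+: cs)) : findTokensBLoop tokens none cs = tokens := by
  induction cs with
  | nil => simp [findTokensBLoop]
  | cons c cs ih =>
    cases cs with
    | nil => simp [findTokensBLoop]
    | cons c2 rest =>
      have hnp : ¬ (c = '{' ∧ c2 = '{') := by
        rintro ⟨h1, h2⟩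
        exact h (List.IsPrefix.isInfix ⟨rest, by simp [h1, h2]⟩)
      rw [findTokensBLoop]
      simp only [if_neg hnp]
      exact ih (fun hi => h (List.infix_cons hi))

-- no "}}" anywhere: the scan inside a token never closes it
theorem bloop_buf_no_close (cs : List Char) (tokens : PySem.Set String) (b : List Char)
    (h : ¬ (['}', '}'] <:+: cs)) : findTokensBLoop tokens (some b) cs = tokens := by
  induction cs generalizing b with
  | nil => simp [findTokensBLoop]
  | cons c cs ih =>
    cases cs with
    | nil => simp [findTokensBLoop]
    | cons c2 rest =>
      have hnp : ¬ (c = '}' ∧ c2 = '}') := by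
        rintro ⟨h1, h2⟩
        exact h (List.IsPrefix.isInfix ⟨rest, by simp [h1, h2]⟩)
      rw [findTokensBLoop]
      simp only [if_neg hnp]
      exact ih (b ++ [c]) (fun hi => h (List.infix_cons hi))

-- outside a token the scan skips forward to the first "{{"
theorem bloop_none_skip (m : Nat) (cs : List Char) (tokens : PySem.Set String)
    (h : ∀ i < m, ¬ (['{', '{'] <+: cs.drop i)) :
    findTokensBLoop tokens none cs = findTokensBLoop tokens none (cs.drop m) := by
  induction m generalizing cs with
  | zero => simp
  | succ m ih =>
    cases cs with
    | nil => simp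
    | cons c cs' =>
      cases cs' with
      | nil => simp [findTokensBLoop]
      | cons c2 rest =>
        have h0 := h 0 (Nat.succ_pos m)
        have hnp : ¬ (c = '{' ∧ c2 = '{') := by
          rintro ⟨h1, h2⟩
          exact h0 ⟨rest, by simp [h1, h2]⟩
        rw [findTokensBLoop]
        simp only [if_neg hnp, List.drop_succ_cons]
        exact ih (c2 :: rest) (fun i hi => by
          have := h (i + 1) (by omega)
          simpa using this)

-- inside a token the scan collects chars up to the first "}}" and emits the token
theorem bloop_buf_close (m : Nat) (cs : List Char) (tokens : PySem.Set String) (b : List Char)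
    (hmin : ∀ i < m, ¬ (['}', '}'] <+: cs.drop i)) (hcl : ['}', '}'] <+: cs.drop m) :
    findTokensBLoop tokens (some b) cs
      = findTokensBLoop (PySem.Set.add tokens (String.ofList (b ++ cs.take m ++ ['}', '}']))) none (cs.drop (m + 2)) := by
  induction m generalizing cs b with
  | zero =>
    obtain ⟨t, ht⟩ := hcl
    simp only [List.drop_zero] at ht
    subst ht
    rw [findTokensBLoop.eq_def]
    simp
  | succ m ih =>
    cases cs with
    | nil => simp at hcl
    | cons c cs' =>
      cases cs' with
      | nil =>
        have : List.drop (m + 1) [c] = ([] : List Char) := by simp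
        rw [this] at hcl
        simp at hcl
      | cons c2 rest =>
        have h0 := hmin 0 (Nat.succ_pos m)
        have hnp : ¬ (c = '}' ∧ c2 = '}') := by
          rintro ⟨h1, h2⟩
          exact h0 ⟨rest, by simp [h1, h2]⟩
        rw [findTokensBLoop]
        simp only [if_neg hnp]
        rw [ih (c2 :: rest) (b ++ [c])
          (fun i hi => by have := hmin (i + 1) (by omega); simpa using this)
          (by simpa using hcl)]
        simp

theorem main_loop (fuel : Nat) (s : List Char) (k : Nat) (tokens : PySem.Set String)
    (hk : k ≤ s.length) (hf : s.length + 1 - k ≤ fuel) :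
    findTokensALoop fuel s tokens (k : Int) = findTokensBLoop tokens none (s.drop k) := by
  induction fuel generalizing k tokens with
  | zero => omega
  | succ fuel ih =>
    rw [findTokensALoop]
    rw [PySem.Chars.findFrom_natCast s ['{', '{'] k hk]
    by_cases hfind : PySem.Chars.find (s.drop k) ['{', '{'] = -1
    · rw [if_pos (by rw [hfind]; norm_num)]
      exact (bloop_none_no_open _ tokens ((PySem.Chars.find_eq_neg_one_iff _ _).mp hfind)).symm
    · have hnn : 0 ≤ PySem.Chars.find (s.drop k) ['{', '{'] := by
        have := PySem.Chars.neg_one_le_find (s.drop k) ['{', '{']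
        omega
      set r : Nat := (PySem.Chars.find (s.drop k) ['{', '{']).toNat with hrdef
      have hr : PySem.Chars.find (s.drop k) ['{', '{'] = (r : Int) :=
        (Int.toNat_of_nonneg hnn).symm
      obtain ⟨hpre, hminO⟩ := PySem.Chars.find_spec (s := s.drop k) (sub := ['{', '{']) hnn
      rw [hr] at hpre hminO
      simp only [Int.toNat_natCast] at hpre hminO
      rw [List.drop_drop] at hpre
      have hp2 : k + r + 2 ≤ s.length := by
        have := hpre.length_le
        simp at this
        omega
      rw [if_neg hfind, hr, if_neg (by omega)]
      have hcast : ((k : Int) + (r : Int) + 2) = (((k + r + 2 : Nat)) : Int) := by push_cast; ring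
      rw [hcast, PySem.Chars.findFrom_natCast s ['}', '}'] (k + r + 2) hp2]
      -- B side: skip forward to position k + r, then enter the token
      obtain ⟨t, ht⟩ := hpre
      have htd : t = s.drop (k + r + 2) := by
        have h2 : (s.drop (k + r)).drop 2 = t := by rw [← ht]; simp
        rw [List.drop_drop] at h2
        exact h2.symm
      have hopen : s.drop (k + r) = '{' :: '{' :: s.drop (k + r + 2) := by
        rw [← ht, htd]; rfl
      have hskip : findTokensBLoop tokens none (s.drop k)
          = findTokensBLoop tokens none (s.drop (k + r)) := by
        have hd : (s.drop k).drop r = s.drop (k + r) := by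
          rw [List.drop_drop]
        rw [← hd]
        exact bloop_none_skip r (s.drop k) tokens hminO
      have hstep : ∀ u : List Char, findTokensBLoop tokens none ('{' :: '{' :: u)
          = findTokensBLoop tokens (some ['{', '{']) u := by
        intro u
        rw [findTokensBLoop.eq_def]
        simp
      by_cases hfind2 : PySem.Chars.find (s.drop (k + r + 2)) ['}', '}'] = -1
      · rw [if_pos (by rw [if_pos hfind2]; norm_num)]
        rw [hskip, hopen, hstep]
        exact (bloop_buf_no_close _ tokens _
          ((PySem.Chars.find_eq_neg_one_iff _ _).mp hfind2)).symm
      · have hnn2 : 0 ≤ PySem.Chars.find (s.drop (k + r + 2)) ['}', '}'] := by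
          have := PySem.Chars.neg_one_le_find (s.drop (k + r + 2)) ['}', '}']
          omega
        set r2 : Nat := (PySem.Chars.find (s.drop (k + r + 2)) ['}', '}']).toNat with hr2def
        have hr2 : PySem.Chars.find (s.drop (k + r + 2)) ['}', '}'] = (r2 : Int) :=
          (Int.toNat_of_nonneg hnn2).symm
        obtain ⟨hpre2, hmin2⟩ := PySem.Chars.find_spec (s := s.drop (k + r + 2)) (sub := ['}', '}']) hnn2
        rw [hr2] at hpre2 hmin2
        simp only [Int.toNat_natCast] at hpre2 hmin2
        have hpre2' : ['}', '}'] <+: s.drop (k + r + 2 + r2) := by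
          have hd : (s.drop (k + r + 2)).drop r2 = s.drop (k + r + 2 + r2) := by
            rw [List.drop_drop]
          rw [← hd]; exact hpre2
        have hq2 : k + r + 2 + r2 + 2 ≤ s.length := by
          have := hpre2'.length_le
          simp at this
          omega
        rw [if_neg (by rw [if_neg hfind2, hr2]; omega)]
        rw [if_neg hfind2, hr2]
        have hclose : s.drop (k + r + 2 + r2) = '}' :: '}' :: s.drop (k + r + 2 + r2 + 2) := by
          obtain ⟨t2, ht2⟩ := hpre2'
          have h2 : (s.drop (k + r + 2 + r2)).drop 2 = t2 := by rw [← ht2]; simp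
          rw [List.drop_drop] at h2
          rw [← ht2, h2]
          rfl
        have hcast2 : ((k + r + 2 : Nat) : Int) + (r2 : Int) + 2
            = ((k + r + 2 + r2 + 2 : Nat) : Int) := by push_cast; ring
        have hcastp : ((k : Int) + (r : Int)) = ((k + r : Nat) : Int) := by push_cast; ring
        rw [hcast2, hcastp, PySem.List.slice_natCast]
        have htok : List.take (k + r + 2 + r2 + 2 - (k + r)) (s.drop (k + r))
            = ['{', '{'] ++ (s.drop (k + r + 2)).take r2 ++ ['}', '}'] := by
          rw [hopen]
          have he : k + r + 2 + r2 + 2 - (k + r) = (r2 + 2) + 2 := by omega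
          rw [he]
          simp only [List.take_succ_cons]
          have ht2 : List.take (r2 + 2) (s.drop (k + r + 2))
              = (s.drop (k + r + 2)).take r2 ++ ['}', '}'] := by
            have hd : (s.drop (k + r + 2)).drop r2 = s.drop (k + r + 2 + r2) := by
              rw [List.drop_drop]
            rw [List.take_add, hd, hclose]
            simp
          rw [ht2]
          simp
        rw [htok]
        -- B side: skip to the "{{", enter the token, close it at the "}}"
        rw [hskip, hopen, hstep]
        rw [bloop_buf_close r2 (s.drop (k + r + 2)) tokens ['{', '{'] hmin2 hpre2]
        have hd2 : (s.drop (k + r + 2)).drop (r2 + 2) = s.drop (k + r + 2 + r2 + 2) := by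
          rw [List.drop_drop]
          exact congrArg (fun n => List.drop n s) (by omega)
        rw [hd2]
        exact ih (k + r + 2 + r2 + 2) _ hq2 (by omega)


-- ===== VERDICT (by name: the statement is the Claim_ definition above) =====
theorem find_tokens_py_spec : Claim_equal_find_tokens_py := by
  intro template _
  unfold Spec_find_tokens_py find_tokens_py find_tokens_py_alt
  have h := main_loop (template.toList.length + 1) template.toList 0 PySem.Set.empty
    (Nat.zero_le _) (by omega)
  simpa using h
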